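-- pv_equiv track=rewrite | github.com/Mundreanuc223/Networking-P2P | peer_message.py | parse_bitfield
-- ===== SOURCE A (Python) =====
-- def parse_bitfield(payload, num_pieces):
--     bitfield = []
--     for i in range(num_pieces):
--         byte_index = i // 8
--         bit_position = 7 - (i % 8)
--         bit = (payload[byte_index] >> bit_position) & 1
--         bitfield.append(bit)
--     return bitfield
-- ===== SOURCE B (Python) =====
-- def parse_bitfield(payload, num_pieces):
--     nbytes = (num_pieces + 7) // 8
--     bits = []
--     for bi in range(nbytes):
--         b = payload[bi]
--         bits.extend((b >> (7 - j)) & 1 for j in range(8))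
--     return bits[:num_pieces]
-- ===== Notes on version B (the rewrite author's own statement) =====
-- stated objective: alternative
-- what changed: Replaced the flat per-bit loop (one index-arithmetic payload lookup per bit) by a per-byte loop that reads each of the ceil(num_pieces/8) payload bytes once, unpacks its 8 bits MSB-first, and truncates the concatenation to num_pieces entries.
import Mathlib
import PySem

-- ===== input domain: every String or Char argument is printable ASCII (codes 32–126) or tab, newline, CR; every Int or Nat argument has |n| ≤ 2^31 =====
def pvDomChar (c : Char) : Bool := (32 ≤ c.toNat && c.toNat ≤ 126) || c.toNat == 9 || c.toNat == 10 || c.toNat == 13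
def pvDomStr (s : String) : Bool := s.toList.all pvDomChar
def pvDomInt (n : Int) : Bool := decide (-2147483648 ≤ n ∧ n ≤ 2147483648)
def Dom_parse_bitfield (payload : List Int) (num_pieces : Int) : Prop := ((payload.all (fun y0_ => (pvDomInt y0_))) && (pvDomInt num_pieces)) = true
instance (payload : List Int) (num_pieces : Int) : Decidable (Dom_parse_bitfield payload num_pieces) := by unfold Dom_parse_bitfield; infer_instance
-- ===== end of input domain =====

-- B replaces A's flat per-bit loop by a per-byte loop that unpacks each byte's 8 bits
-- MSB-first and truncates to num_pieces (objective: alternative decomposition, same cost).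

-- ===== PORT A =====
def parse_bitfield (payload : List Int) (num_pieces : Int) : List Int :=
  (PySem.List.pyRange 0 num_pieces 1).foldl
    (fun bitfield i =>
      let byte_index := PySem.Int.floordiv i 8
      let bit_position := 7 - PySem.Int.mod i 8
      let bit := PySem.Int.band (PySem.List.pyGetD payload byte_index 0 >>> (bit_position.toNat : Int)) 1
      bitfield ++ [bit]) []

-- ===== PORT B =====
def parse_bitfield_alt (payload : List Int) (num_pieces : Int) : List Int :=
  let nbytes := PySem.Int.floordiv (num_pieces + 7) 8
  let bits := (PySem.List.pyRange 0 nbytes 1).foldl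
    (fun bits bi =>
      let b := PySem.List.pyGetD payload bi 0
      bits ++ (PySem.List.pyRange 0 8 1).map (fun j => PySem.Int.band (b >>> ((7 - j).toNat : Int)) 1)) []
  PySem.List.slice bits none (some num_pieces)

-- ===== PRECONDITION & SPEC =====
-- Pre_ excludes exactly the inputs where Python A raises IndexError: it reads payload
-- bytes 0 .. ceil(num_pieces/8) - 1, so the payload must hold at least that many entries.
def Pre_parse_bitfield (payload : List Int) (num_pieces : Int) : Prop :=
  PySem.Int.floordiv (num_pieces + 7) 8 ≤ (payload.length : Int)
instance (payload : List Int) (num_pieces : Int) : Decidable (Pre_parse_bitfield payload num_pieces) := by unfold Pre_parse_bitfield; infer_instance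
def pvWitness_parse_bitfield : List Int × Int := ([170, 3], 10)

def Spec_parse_bitfield (payload : List Int) (num_pieces : Int) (out : List Int) : Prop := out = parse_bitfield_alt payload num_pieces
instance (payload : List Int) (num_pieces : Int) (out : List Int) : Decidable (Spec_parse_bitfield payload num_pieces out) := by unfold Spec_parse_bitfield; infer_instance

-- ===== CLAIM (what is proved, stated in full; the proofs are below) =====
def Claim_equal_parse_bitfield : Prop := ∀ (payload : List Int) (num_pieces : Int), Dom_parse_bitfield payload num_pieces → Pre_parse_bitfield payload num_pieces → Spec_parse_bitfield payload num_pieces (parse_bitfield payload num_pieces)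

-- ===== LEMMAS AND PROOFS =====

-- the per-bit value, as A computes it from the flat bit index
def pvBit (payload : List Int) (i : Int) : Int :=
  PySem.Int.band (PySem.List.pyGetD payload (PySem.Int.floordiv i 8) 0 >>> ((7 - PySem.Int.mod i 8).toNat : Int)) 1

theorem pvBlock_eq (payload : List Int) (m : Int) :
    (PySem.List.pyRange 0 8 1).map
        (fun j => PySem.Int.band (PySem.List.pyGetD payload m 0 >>> ((7 - j).toNat : Int)) 1)
      = (PySem.List.pyRange (8 * m) (8 * m + 8) 1).map (pvBit payload) := by
  have h8 : ((8 : Int) - 0).toNat = 8 := by decide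
  have h8' : (8 * m + 8 - 8 * m).toNat = 8 := by omega
  rw [PySem.List.pyRange_one 0 8, PySem.List.pyRange_one (8 * m) (8 * m + 8), h8, h8',
    List.map_map, List.map_map]
  apply List.map_congr_left
  intro k hk
  simp only [List.mem_range] at hk
  have hk8 : (k : Int) < 8 := by exact_mod_cast hk
  simp only [Function.comp_apply]
  unfold pvBit
  have h1 : PySem.Int.floordiv (8 * m + (k : Int)) 8 = m := by
    rw [PySem.Int.floordiv_eq_ediv_of_pos (by norm_num)]; omega
  have h2 : PySem.Int.mod (8 * m + (k : Int)) 8 = (k : Int) := by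
    rw [PySem.Int.mod_eq_emod_of_pos (by norm_num)]; omega
  rw [h1, h2]
  norm_num

theorem pvFlat_eq (payload : List Int) (nb : Nat) :
    (PySem.List.pyRange 0 (nb : Int) 1).flatMap
        (fun bi => (PySem.List.pyRange 0 8 1).map
            (fun j => PySem.Int.band (PySem.List.pyGetD payload bi 0 >>> ((7 - j).toNat : Int)) 1))
      = (PySem.List.pyRange 0 (8 * nb : Int) 1).map (pvBit payload) := by
  induction nb with
  | zero => simp [PySem.List.pyRange_one_eq_nil]
  | succ n ih =>
    have h1 : ((n + 1 : Nat) : Int) = (n : Int) + 1 := by push_cast; ring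
    have h2 : (8 : Int) * ((n : Int) + 1) = 8 * (n : Int) + 8 := by ring
    rw [h1, h2, PySem.List.pyRange_one_succ_right (by positivity),
      PySem.List.pyRange_one_append 0 (8 * (n : Int)) (8 * (n : Int) + 8) (by positivity) (by omega),
      List.flatMap_append, List.map_append, List.flatMap_cons, List.flatMap_nil, List.append_nil]
    rw [ih, pvBlock_eq]

theorem parse_bitfield_A_eq (payload : List Int) (n : Int) :
    parse_bitfield payload n = (PySem.List.pyRange 0 n 1).map (pvBit payload) := by
  simp only [parse_bitfield]
  rw [PySem.List.foldl_append_singleton_eq_map, List.nil_append]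
  rfl

theorem parse_bitfield_B_eq (payload : List Int) (n : Int) :
    parse_bitfield_alt payload n =
      PySem.List.slice
        ((PySem.List.pyRange 0 (PySem.Int.floordiv (n + 7) 8) 1).flatMap
          (fun bi => (PySem.List.pyRange 0 8 1).map
            (fun j => PySem.Int.band (PySem.List.pyGetD payload bi 0 >>> ((7 - j).toNat : Int)) 1)))
        none (some n) := by
  simp only [parse_bitfield_alt]
  rw [PySem.List.foldl_append_eq_flatMap, List.nil_append]

-- ===== VERDICT (by name: the statement is the Claim_ definition above) =====
theorem parse_bitfield_spec : Claim_equal_parse_bitfield := by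
  unfold Claim_equal_parse_bitfield
  intro payload n _ _
  unfold Spec_parse_bitfield
  rw [parse_bitfield_A_eq, parse_bitfield_B_eq]
  have hfd : PySem.Int.floordiv (n + 7) 8 = (n + 7) / 8 :=
    PySem.Int.floordiv_eq_ediv_of_pos (by norm_num)
  by_cases hn : n ≤ 0
  · have hA : PySem.List.pyRange 0 n 1 = [] := PySem.List.pyRange_one_eq_nil hn
    have hnb : PySem.Int.floordiv (n + 7) 8 ≤ 0 := by rw [hfd]; omega
    have hB : PySem.List.pyRange 0 (PySem.Int.floordiv (n + 7) 8) 1 = [] :=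
      PySem.List.pyRange_one_eq_nil hnb
    rw [hA, hB, List.flatMap_nil, List.map_nil]
    simp [PySem.List.slice]
  · replace hn : 0 < n := lt_of_not_ge hn
    have hnb0 : 0 ≤ PySem.Int.floordiv (n + 7) 8 := by rw [hfd]; omega
    obtain ⟨k, hk⟩ : ∃ k : Nat, PySem.Int.floordiv (n + 7) 8 = (k : Int) :=
      ⟨(PySem.Int.floordiv (n + 7) 8).toNat, (Int.toNat_of_nonneg hnb0).symm⟩
    have hnk : n ≤ 8 * (k : Int) := by
      have := hfd ▸ hk; omega
    rw [hk, pvFlat_eq, PySem.List.slice_to _ (by omega : (0:Int) ≤ n)]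
    rw [PySem.List.pyRange_one 0 n, PySem.List.pyRange_one 0 (8 * (k : Int))]
    have hc1 : ((n : Int) - 0).toNat = n.toNat := by omega
    have hc2 : ((8 * (k : Int)) - 0).toNat = 8 * k := by omega
    rw [hc1, hc2, List.map_map, List.map_map, ← List.map_take, List.take_range]
    have hmin : min n.toNat (8 * k) = n.toNat := by omega
    rw [hmin]
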